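-- pv_equiv track=rewrite | github.com/981377660LMT/algorithm-study | tmp/117/4.py | maxSpending
-- ===== SOURCE A (Python) =====
-- from heapq import heapify, heappop, heappush
-- from typing import List, Tuple, Optional
--
-- def maxSpending(values: List[List[int]]) -> int:
--     ROW, COL = len(values), len(values[0])
--     pq = []
--     for r, row in enumerate(values):
--         pq.append((row[-1], r, COL - 1))
--     heapify(pq)
--     res = 0
--     for day in range(1, ROW * COL + 1):
--         min_, r, c = heappop(pq)
--         res += min_ * day
--         if c > 0:
--             heappush(pq, (values[r][c - 1], r, c - 1))
--     return res
-- ===== SOURCE B (Python) =====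
-- def maxSpending(values):
--     cols = len(values[0])
--     remaining = [cols] * len(values)
--     res = 0
--     for day in range(1, len(values) * cols + 1):
--         best = -1
--         for r, row in enumerate(values):
--             k = remaining[r]
--             if k > 0 and (best < 0 or row[k - 1] < values[best][remaining[best] - 1]):
--                 best = r
--         remaining[best] -= 1
--         res += values[best][remaining[best]] * day
--     return res
-- ===== Notes on version B (the rewrite author's own statement) =====
-- stated objective: alternative
-- what changed: A merges the rows' tails through a heapq priority queue of (value, row, col) tuples; B keeps only a per-row counter of unconsumed elements and, each day, picks the row with the smallest current tail value (first row on ties) by a plain linear scan - no heap, no tuple queue.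
-- outside the precondition, e.g. on maxSpending([[1, 2], [3, 4, 5]]): A returns 31, B returns 28
import Mathlib
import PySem

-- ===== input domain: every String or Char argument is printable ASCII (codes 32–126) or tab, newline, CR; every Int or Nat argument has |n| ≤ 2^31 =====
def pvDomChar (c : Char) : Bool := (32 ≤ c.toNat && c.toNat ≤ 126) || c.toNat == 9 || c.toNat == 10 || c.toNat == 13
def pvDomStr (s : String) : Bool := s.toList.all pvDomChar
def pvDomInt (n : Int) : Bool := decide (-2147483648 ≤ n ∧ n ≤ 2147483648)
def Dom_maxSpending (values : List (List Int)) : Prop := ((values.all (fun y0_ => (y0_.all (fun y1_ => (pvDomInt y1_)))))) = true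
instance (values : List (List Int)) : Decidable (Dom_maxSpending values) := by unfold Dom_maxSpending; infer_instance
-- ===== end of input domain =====

-- B replaces A's heap merge by a direct repeated-minimum selection over per-row
-- counters (no heap, no tuple queue); same cost class, plainer code ("alternative").

-- ===== PORT A =====
-- Python tuple comparison (v, r, c) < (v', r', c'): lexicographic on Ints.
def pvHeapLt (x y : Int × Int × Int) : Bool :=
  decide (x.1 < y.1) ||
    (decide (x.1 = y.1) && (decide (x.2.1 < y.2.1) ||
      (decide (x.2.1 = y.2.1) && decide (x.2.2 < y.2.2))))

-- heapq modeled at its contract level (the heap's internal array layout is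
-- unobservable in A's result): heappush = append, heappop = smallest tuple +
-- first-occurrence removal, heapify = no-op on the multiset.
def pvHeapMin (pq : List (Int × Int × Int)) : Option (Int × Int × Int) :=
  match pq with
  | [] => none
  | x :: xs => some (xs.foldl (fun m y => if pvHeapLt y m then y else m) x)

-- body of A's `for day in range(...)` loop
def pvStepA (values : List (List Int)) (st : List (Int × Int × Int) × Int) (day : Int) :
    List (Int × Int × Int) × Int :=
  match pvHeapMin st.1 with
  | none => st  -- Python heappop raises IndexError here; unreachable under Pre_
  | some m =>
    let pq' := st.1.erase m
    let res := st.2 + m.1 * day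
    if m.2.2 > 0 then
      (pq' ++ [(PySem.List.pyGetD (PySem.List.pyGetD values m.2.1 []) (m.2.2 - 1) 0,
                m.2.1, m.2.2 - 1)], res)
    else (pq', res)

def maxSpending (values : List (List Int)) : Int :=
  match values with
  | [] => 0  -- Python raises IndexError on values[0]; excluded by Pre_
  | row0 :: _ =>
    let COL : Int := PySem.List.len row0
    let pq : List (Int × Int × Int) :=
      (PySem.List.enumerate values 0).foldl
        (fun pq rr => pq ++ [(PySem.List.pyGetD rr.2 (-1) 0, rr.1, COL - 1)]) []
    let st := (PySem.List.pyRange 1 (PySem.List.len values * COL + 1) 1).foldl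
        (pvStepA values) (pq, 0)
    st.2

-- ===== PORT B =====
-- body of B's `for day in range(...)` loop: linear scan for the row with the
-- smallest current tail value (first such row on ties), then consume it.
def pvStepB (values : List (List Int)) (st : List Int × Int) (day : Int) : List Int × Int :=
  let rem := st.1
  let best : Int :=
    (PySem.List.enumerate values 0).foldl
      (fun best rr =>
        let k := PySem.List.pyGetD rem rr.1 0
        if k > 0 && (best < 0 ||
            PySem.List.pyGetD rr.2 (k - 1) 0 <
              PySem.List.pyGetD (PySem.List.pyGetD values best [])
                (PySem.List.pyGetD rem best 0 - 1) 0)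
        then rr.1 else best)
      (-1)
  let rem' := PySem.List.pySetD rem best (PySem.List.pyGetD rem best 0 - 1)
  (rem', st.2 + PySem.List.pyGetD (PySem.List.pyGetD values best [])
                  (PySem.List.pyGetD rem' best 0) 0 * day)

def maxSpending_alt (values : List (List Int)) : Int :=
  match values with
  | [] => 0  -- Python raises IndexError on values[0]; excluded by Pre_
  | row0 :: _ =>
    let cols : Int := PySem.List.len row0
    let st := (PySem.List.pyRange 1 (PySem.List.len values * cols + 1) 1).foldl
        (pvStepB values) (List.replicate values.length cols, 0)
    st.2

-- ===== PRECONDITION & SPEC =====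
-- Pre_ excludes the empty list (A raises IndexError on values[0]) and ragged
-- inputs (rows of unequal length): there A mixes each row's LAST element with
-- column indices computed from values[0]'s length — an accident of its
-- implementation on which it raises or returns arbitrary mixtures, while B
-- reads each row's own tail (and raises on rows shorter than values[0]).
def Pre_maxSpending (values : List (List Int)) : Prop :=
  values ≠ [] ∧ 0 < (values.headD []).length ∧
    ∀ row ∈ values, row.length = (values.headD []).length
instance (values : List (List Int)) : Decidable (Pre_maxSpending values) := by
  unfold Pre_maxSpending; infer_instance

def pvWitness_maxSpending : List (List Int) := [[5, 1], [4, 2]]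

def Spec_maxSpending (values : List (List Int)) (out : Int) : Prop := out = maxSpending_alt values
instance (values : List (List Int)) (out : Int) : Decidable (Spec_maxSpending values out) := by
  unfold Spec_maxSpending; infer_instance

-- ===== CLAIM (what is proved, stated in full; the proofs are below) =====
def Claim_equal_maxSpending : Prop := ∀ (values : List (List Int)), Dom_maxSpending values → Pre_maxSpending values → Spec_maxSpending values (maxSpending values)

-- ===== LEMMAS AND PROOFS =====

-- current counter of row r / current tail value of row r
def pvK (rem : List Int) (r : Nat) : Int := rem.getD r 0
def pvV (values : List (List Int)) (rem : List Int) (r : Nat) : Int :=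
  PySem.List.pyGetD (values.getD r []) (pvK rem r - 1) 0
-- the heap entry row r currently contributes
def pvEnt (values : List (List Int)) (rem : List Int) (r : Nat) : Int × Int × Int :=
  (pvV values rem r, (r : Int), pvK rem r - 1)
-- the multiset A's pq holds, as a canonical list
def pvFrontier (values : List (List Int)) (rem : List Int) : List (Int × Int × Int) :=
  (List.range rem.length).filterMap
    (fun r => if 0 < pvK rem r then some (pvEnt values rem r) else none)

def pvInv (values : List (List Int)) (rem : List Int) : Prop :=
  rem.length = values.length ∧
    ∀ r < rem.length, 0 ≤ pvK rem r ∧ pvK rem r ≤ ((values.getD r []).length : Int)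

-- scan result characterisation
def pvIsBest (values : List (List Int)) (rem : List Int) (n : Nat) (best : Int) : Prop :=
  (best = -1 ∧ ∀ r < n, pvK rem r ≤ 0) ∨
  (∃ b : Nat, best = (b : Int) ∧ b < n ∧ 0 < pvK rem b ∧
    ∀ r < n, 0 < pvK rem r →
      (pvV values rem b < pvV values rem r ∨
       (pvV values rem b = pvV values rem r ∧ b ≤ r)))

theorem pvHeapLt_false_iff (x y : Int × Int × Int) : pvHeapLt x y = false ↔
    ¬(x.1 < y.1 ∨ (x.1 = y.1 ∧ (x.2.1 < y.2.1 ∨ (x.2.1 = y.2.1 ∧ x.2.2 < y.2.2)))) := by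
  simp [pvHeapLt]

theorem pvHeapLt_asymm (x y : Int × Int × Int)
    (h1 : pvHeapLt x y = false) (h2 : pvHeapLt y x = false) : x = y := by
  obtain ⟨a, b, c⟩ := x; obtain ⟨d, e, f⟩ := y
  rw [pvHeapLt_false_iff] at h1 h2
  simp only at h1 h2
  have : a = d ∧ b = e ∧ c = f := by omega
  simp [this.1, this.2.1, this.2.2]

theorem pvFoldMin_spec (xs : List (Int × Int × Int)) : ∀ x : Int × Int × Int,
    (xs.foldl (fun m y => if pvHeapLt y m then y else m) x) ∈ x :: xs ∧
    ∀ y ∈ x :: xs, pvHeapLt y (xs.foldl (fun m y => if pvHeapLt y m then y else m) x) = false := by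
  induction xs with
  | nil =>
    intro x
    simp only [List.foldl_nil]
    refine ⟨List.mem_singleton_self x, ?_⟩
    intro y hy
    simp only [List.mem_singleton] at hy; subst hy
    rw [pvHeapLt_false_iff]; omega
  | cons z zs ih =>
    intro x
    simp only [List.foldl_cons]
    by_cases hzx : pvHeapLt z x = true
    · rw [if_pos hzx]
      obtain ⟨hmem, hmin⟩ := ih z
      refine ⟨?_, ?_⟩
      · rcases List.mem_cons.1 hmem with h | h
        · simp [h]
        · simp [h]
      · intro y hy
        have hm := hmin _ (List.mem_cons_self ..)
        rcases List.mem_cons.1 hy with rfl | hy2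
        · rw [pvHeapLt_false_iff] at hm ⊢
          simp only [pvHeapLt, Bool.or_eq_true, Bool.and_eq_true, decide_eq_true_eq] at hzx
          omega
        · rcases List.mem_cons.1 hy2 with rfl | hy3
          · exact hm
          · exact hmin _ (List.mem_cons_of_mem _ hy3)
    · rw [if_neg hzx]
      obtain ⟨hmem, hmin⟩ := ih x
      refine ⟨?_, ?_⟩
      · rcases List.mem_cons.1 hmem with h | h
        · simp [h]
        · simp [h]
      · intro y hy
        have hm := hmin _ (List.mem_cons_self ..)
        rcases List.mem_cons.1 hy with rfl | hy2
        · exact hm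
        · rcases List.mem_cons.1 hy2 with rfl | hy3
          · rw [Bool.not_eq_true] at hzx
            rw [pvHeapLt_false_iff] at hzx hm ⊢
            omega
          · exact hmin _ (List.mem_cons_of_mem _ hy3)

theorem pvHeapMin_spec (pq : List (Int × Int × Int)) (m : Int × Int × Int)
    (h : pvHeapMin pq = some m) : m ∈ pq ∧ ∀ y ∈ pq, pvHeapLt y m = false := by
  match pq with
  | [] => simp [pvHeapMin] at h
  | x :: xs =>
    simp only [pvHeapMin, Option.some.injEq] at h
    obtain ⟨h1, h2⟩ := pvFoldMin_spec xs x
    rw [h] at h1 h2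
    exact ⟨h1, h2⟩

theorem pvHeapMin_perm (pq L : List (Int × Int × Int)) (hp : pq.Perm L)
    (m : Int × Int × Int) (h : pvHeapMin pq = some m) :
    m ∈ L ∧ ∀ y ∈ L, pvHeapLt y m = false := by
  obtain ⟨h1, h2⟩ := pvHeapMin_spec pq m h
  exact ⟨hp.mem_iff.1 h1, fun y hy => h2 y (hp.mem_iff.2 hy)⟩

theorem pvScan_rw (values : List (List Int)) (rem : List Int) :
    ((PySem.List.enumerate values 0).foldl
        (fun best rr =>
          let k := PySem.List.pyGetD rem rr.1 0
          if k > 0 && (best < 0 ||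
              PySem.List.pyGetD rr.2 (k - 1) 0 <
                PySem.List.pyGetD (PySem.List.pyGetD values best [])
                  (PySem.List.pyGetD rem best 0 - 1) 0)
          then rr.1 else best)
        (-1)) =
    ((List.range values.length).foldl
        (fun best k =>
          if pvK rem k > 0 && (best < 0 ||
              pvV values rem k <
                PySem.List.pyGetD (PySem.List.pyGetD values best [])
                  (PySem.List.pyGetD rem best 0 - 1) 0)
          then (k : Int) else best)
        (-1)) := by
  rw [PySem.List.enumerate_eq_map_pyRange values [], List.foldl_map]
  have h1 : PySem.List.len values = ((values.length : Nat) : Int) := by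
    simp [PySem.List.len_eq]
  rw [h1, PySem.List.pyRange_zero_nat, List.foldl_map]
  apply PySem.List.foldl_congr_mem
  intro best k hk
  simp only [PySem.List.pyGetD_natCast, pvK, pvV]
  rfl

theorem pvRhs_nat (values : List (List Int)) (rem : List Int) (b : Nat) :
    PySem.List.pyGetD (PySem.List.pyGetD values (b : Int) [])
      (PySem.List.pyGetD rem (b : Int) 0 - 1) 0 = pvV values rem b := by
  simp only [PySem.List.pyGetD_natCast, pvK, pvV]

theorem pvScan_range_isBest (values : List (List Int)) (rem : List Int) : ∀ n : Nat,
    pvIsBest values rem n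
      ((List.range n).foldl
        (fun best k =>
          if pvK rem k > 0 && (best < 0 ||
              pvV values rem k <
                PySem.List.pyGetD (PySem.List.pyGetD values best [])
                  (PySem.List.pyGetD rem best 0 - 1) 0)
          then (k : Int) else best)
        (-1)) := by
  intro n
  induction n with
  | zero =>
    left
    constructor
    · simp
    · intro r hr; omega
  | succ n ih =>
    rw [List.range_succ, List.foldl_append, List.foldl_cons, List.foldl_nil]
    set bn := (List.range n).foldl _ (-1) with hbn
    rcases ih with ⟨hneg, hall⟩ | ⟨b, hb, hbn', hpos, hmin⟩
    · -- no candidate so far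
      by_cases hk : 0 < pvK rem n
      · rw [hneg]
        rw [if_pos (by simp [hk])]
        right
        refine ⟨n, rfl, Nat.lt_succ_self n, hk, ?_⟩
        intro r hr hkr
        rcases Nat.lt_succ_iff_lt_or_eq.1 hr with h | rfl
        · exact absurd hkr (by simpa using (hall r h))
        · exact Or.inr ⟨rfl, le_refl _⟩
      · rw [if_neg (by simp [hk])]
        left
        refine ⟨hneg, ?_⟩
        intro r hr
        rcases Nat.lt_succ_iff_lt_or_eq.1 hr with h | rfl
        · exact hall r h
        · omega
    · -- candidate b so far
      rw [hb, pvRhs_nat values rem b]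
      by_cases hcond : 0 < pvK rem n ∧ pvV values rem n < pvV values rem b
      · rw [if_pos (by simp [hcond.1, hcond.2])]
        right
        refine ⟨n, rfl, Nat.lt_succ_self n, hcond.1, ?_⟩
        intro r hr hkr
        rcases Nat.lt_succ_iff_lt_or_eq.1 hr with h | rfl
        · rcases hmin r h hkr with h2 | ⟨h2, h3⟩
          · exact Or.inl (lt_trans hcond.2 h2)
          · exact Or.inl (h2 ▸ hcond.2)
        · exact Or.inr ⟨rfl, le_refl _⟩
      · rw [if_neg ?_]
        · right
          refine ⟨b, rfl, Nat.lt_succ_of_lt hbn', hpos, ?_⟩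
          intro r hr hkr
          rcases Nat.lt_succ_iff_lt_or_eq.1 hr with h | rfl
          · exact hmin r h hkr
          · have : ¬ pvV values rem r < pvV values rem b := fun hlt => hcond ⟨hkr, hlt⟩
            rcases lt_or_ge (pvV values rem b) (pvV values rem r) with h1 | h1
            · exact Or.inl h1
            · exact Or.inr ⟨le_antisymm (by omega) h1, by omega⟩
        · simp only [Bool.and_eq_true, Bool.or_eq_true, decide_eq_true_eq, not_and, not_or]
          intro hk0
          constructor
          · omega
          · intro hlt; exact absurd ⟨hk0, hlt⟩ hcond

theorem pvK_set_ne (rem : List Int) (b r : Nat) (v : Int) (h : b ≠ r) :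
    pvK (rem.set b v) r = pvK rem r := by
  simp [pvK, List.getD_eq_getElem?_getD, List.getElem?_set_ne h]

theorem pvK_set_self (rem : List Int) (b : Nat) (v : Int) (h : b < rem.length) :
    pvK (rem.set b v) b = v := by
  simp [pvK, List.getD_eq_getElem?_getD, h]

theorem pvEnt_set_ne (values : List (List Int)) (rem : List Int) (b r : Nat) (v : Int)
    (h : b ≠ r) : pvEnt values (rem.set b v) r = pvEnt values rem r := by
  simp [pvEnt, pvV, pvK_set_ne rem b r v h]

-- the filterMap body
def pvF (values : List (List Int)) (rem : List Int) (r : Nat) : Option (Int × Int × Int) :=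
  if 0 < pvK rem r then some (pvEnt values rem r) else none

theorem pvFrontier_eq (values : List (List Int)) (rem : List Int) :
    pvFrontier values rem = (List.range rem.length).filterMap (pvF values rem) := rfl

theorem pvMem_frontier (values : List (List Int)) (rem : List Int) (x : Int × Int × Int)
    (h : x ∈ pvFrontier values rem) :
    ∃ r : Nat, r < rem.length ∧ 0 < pvK rem r ∧ x = pvEnt values rem r := by
  rw [pvFrontier_eq] at h
  obtain ⟨r, hr, hf⟩ := List.mem_filterMap.1 h
  simp only [pvF] at hf
  by_cases h0 : 0 < pvK rem r
  · rw [if_pos h0, Option.some.injEq] at hf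
    exact ⟨r, List.mem_range.1 hr, h0, hf.symm⟩
  · rw [if_neg h0] at hf; exact absurd hf (by simp)

theorem pvEnt_mem_frontier (values : List (List Int)) (rem : List Int) (b : Nat)
    (hb : b < rem.length) (hk : 0 < pvK rem b) :
    pvEnt values rem b ∈ pvFrontier values rem := by
  rw [pvFrontier_eq]
  exact List.mem_filterMap.2 ⟨b, List.mem_range.2 hb, by simp [pvF, hk]⟩

theorem pvEnt_not_mem_filterMap (values : List (List Int)) (rem rem2 : List Int) (b : Nat)
    (l : List Nat) (hl : ∀ r ∈ l, r ≠ b) :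
    pvEnt values rem2 b ∉ l.filterMap (pvF values rem) := by
  intro hmem
  obtain ⟨r, hr, hf⟩ := List.mem_filterMap.1 hmem
  simp only [pvF] at hf
  by_cases h0 : 0 < pvK rem r
  · rw [if_pos h0, Option.some.injEq] at hf
    have : (r : Int) = (b : Int) := congrArg (fun t => t.2.1) hf
    exact hl r hr (by exact_mod_cast this)
  · rw [if_neg h0] at hf; exact absurd hf (by simp)

theorem pvRange_split (b m : Nat) :
    List.range (b + 1 + m) = List.range b ++ [b] ++ (List.range m).map (fun i => b + 1 + i) := by
  rw [List.range_add, ← List.range_succ]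

theorem pvFrontier_split (values : List (List Int)) (rem : List Int) (b m : Nat)
    (hm : rem.length = b + 1 + m) :
    pvFrontier values rem =
      (List.range b).filterMap (pvF values rem) ++
      (if 0 < pvK rem b then [pvEnt values rem b] else []) ++
      ((List.range m).map (fun i => b + 1 + i)).filterMap (pvF values rem) := by
  rw [pvFrontier_eq, hm, pvRange_split, List.filterMap_append, List.filterMap_append]
  congr 1
  congr 1
  simp only [List.filterMap_cons, List.filterMap_nil, pvF]
  split_ifs <;> rfl

theorem pvF_set_ne (values : List (List Int)) (rem : List Int) (b r : Nat) (v : Int)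
    (h : b ≠ r) : pvF values (rem.set b v) r = pvF values rem r := by
  simp only [pvF, pvK_set_ne rem b r v h, pvEnt_set_ne values rem b r v h]

theorem pvFrontier_perm_update (values : List (List Int)) (rem : List Int) (b : Nat)
    (hb : b < rem.length) (hpos : 0 < pvK rem b) :
    (pvFrontier values (rem.set b (pvK rem b - 1))).Perm
      ((pvFrontier values rem).erase (pvEnt values rem b) ++
        (if 1 < pvK rem b then [pvEnt values (rem.set b (pvK rem b - 1)) b] else [])) := by
  set rem' := rem.set b (pvK rem b - 1) with hrem'
  have hlen' : rem'.length = rem.length := by simp [hrem']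
  have hm : rem.length = b + 1 + (rem.length - (b + 1)) := by omega
  have hm' : rem'.length = b + 1 + (rem.length - (b + 1)) := by omega
  have hLb : (List.range b).filterMap (pvF values rem') = (List.range b).filterMap (pvF values rem) :=
    List.filterMap_congr (fun r hr => pvF_set_ne values rem b r _ (by
      have := List.mem_range.1 hr; omega))
  have hRb : ((List.range (rem.length - (b + 1))).map (fun i => b + 1 + i)).filterMap (pvF values rem') =
      ((List.range (rem.length - (b + 1))).map (fun i => b + 1 + i)).filterMap (pvF values rem) :=
    List.filterMap_congr (fun r hr => by
      obtain ⟨i, _, rfl⟩ := List.mem_map.1 hr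
      exact pvF_set_ne values rem b _ _ (by omega))
  have hK' : pvK rem' b = pvK rem b - 1 := pvK_set_self rem b _ hb
  have herase : (pvFrontier values rem).erase (pvEnt values rem b) =
      (List.range b).filterMap (pvF values rem) ++
      ((List.range (rem.length - (b + 1))).map (fun i => b + 1 + i)).filterMap (pvF values rem) := by
    rw [pvFrontier_split values rem b _ hm, if_pos hpos, List.append_assoc,
      List.erase_append_right _ (pvEnt_not_mem_filterMap values rem rem b _
        (fun r hr => by have := List.mem_range.1 hr; omega)),
      List.singleton_append, List.erase_cons_head]
  rw [pvFrontier_split values rem' b _ hm', hLb, hRb, herase, hK']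
  by_cases h1 : 1 < pvK rem b
  · rw [if_pos (by omega), if_pos h1]
    refine List.Perm.trans ?_ (List.perm_append_singleton _ _).symm
    rw [List.append_assoc, List.singleton_append]
    exact List.perm_middle
  · rw [if_neg (by omega), if_neg h1]
    simp

theorem pvEnt_min (values : List (List Int)) (rem : List Int) (b : Nat)
    (hmin : ∀ r < rem.length, 0 < pvK rem r →
      (pvV values rem b < pvV values rem r ∨ (pvV values rem b = pvV values rem r ∧ b ≤ r)))
    (y : Int × Int × Int) (hy : y ∈ pvFrontier values rem) :
    pvHeapLt y (pvEnt values rem b) = false := by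
  obtain ⟨r, hr, hkr, rfl⟩ := pvMem_frontier values rem y hy
  rcases hmin r hr hkr with h | ⟨h, hle⟩
  · rw [pvHeapLt_false_iff]
    simp only [pvEnt]
    omega
  · by_cases hrb : r = b
    · subst hrb
      rw [pvHeapLt_false_iff]
      omega
    · rw [pvHeapLt_false_iff]
      simp only [pvEnt]
      have : (b : Int) < (r : Int) := by exact_mod_cast Nat.lt_of_le_of_ne hle (fun h => hrb h.symm)
      omega

theorem pvMin_eq_ent (values : List (List Int)) (rem : List Int) (b : Nat)
    (hb : b < rem.length) (hk : 0 < pvK rem b)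
    (hmin : ∀ r < rem.length, 0 < pvK rem r →
      (pvV values rem b < pvV values rem r ∨ (pvV values rem b = pvV values rem r ∧ b ≤ r)))
    (m : Int × Int × Int) (hm : m ∈ pvFrontier values rem)
    (hminm : ∀ y ∈ pvFrontier values rem, pvHeapLt y m = false) :
    m = pvEnt values rem b := by
  refine pvHeapLt_asymm m (pvEnt values rem b) ?_ ?_
  · exact pvEnt_min values rem b hmin m hm
  · exact hminm _ (pvEnt_mem_frontier values rem b hb hk)

theorem pvSum_pos (rem : List Int) (h : 0 < (rem.map Int.toNat).sum) :
    ∃ r, r < rem.length ∧ 0 < pvK rem r := by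
  induction rem with
  | nil => simp at h
  | cons x xs ih =>
    by_cases hx : 0 < x.toNat
    · exact ⟨0, by simp, by simp [pvK]; omega⟩
    · have : 0 < (xs.map Int.toNat).sum := by simp at h ⊢; omega
      obtain ⟨r, hr, hk⟩ := ih this
      exact ⟨r + 1, by simpa using hr, by simpa [pvK, List.getD_cons_succ] using hk⟩

theorem pvSum_dec (rem : List Int) (b : Nat) (hb : b < rem.length) (hk : 0 < pvK rem b) :
    ((rem.set b (pvK rem b - 1)).map Int.toNat).sum + 1 = (rem.map Int.toNat).sum := by
  have hgd : pvK rem b = rem[b] := by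
    simp [pvK, List.getD_eq_getElem?_getD, List.getElem?_eq_getElem hb]
  rw [List.map_set, List.sum_set]
  have hset : (rem.map Int.toNat).set b ((rem.map Int.toNat)[b]'(by simpa using hb)) = rem.map Int.toNat := by
    exact List.set_getElem_self (by simpa using hb)
  have := List.sum_set (rem.map Int.toNat) b ((rem.map Int.toNat)[b]'(by simpa using hb))
  rw [hset] at this
  have hb' : b < (rem.map Int.toNat).length := by simpa using hb
  rw [this, if_pos hb', if_pos hb']
  have : (rem.map Int.toNat)[b]'hb' = rem[b].toNat := by simp
  omega

theorem pvLoop_eq (values : List (List Int)) :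
    ∀ (days : List Int) (pq : List (Int × Int × Int)) (rem : List Int) (res : Int),
      pq.Perm (pvFrontier values rem) → pvInv values rem →
      days.length ≤ (rem.map Int.toNat).sum →
      (days.foldl (pvStepA values) (pq, res)).2 =
        (days.foldl (pvStepB values) (rem, res)).2 := by
  intro days
  induction days with
  | nil => intro pq rem res _ _ _; rfl
  | cons d ds ih =>
    intro pq rem res hperm hinv hlen
    obtain ⟨hleneq, hbounds⟩ := hinv
    have hsum : 0 < (rem.map Int.toNat).sum := by
      have := hlen; simp only [List.length_cons] at this; omega
    obtain ⟨r0, hr0, hk0⟩ := pvSum_pos rem hsum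
    have hscan := pvScan_range_isBest values rem values.length
    rcases hscan with ⟨hneg, hall⟩ | ⟨b, hb, hblt, hkb, hmin⟩
    · exact absurd hk0 (by simpa using hall r0 (by omega))
    have hblt' : b < rem.length := by omega
    have hmin' : ∀ r < rem.length, 0 < pvK rem r →
        (pvV values rem b < pvV values rem r ∨ (pvV values rem b = pvV values rem r ∧ b ≤ r)) := by
      intro r hr hk; exact hmin r (by omega) hk
    have hne : pq ≠ [] := by
      intro h
      have := hperm.symm.mem_iff.1 (pvEnt_mem_frontier values rem b hblt' hkb)
      rw [h] at this; simp at this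
    obtain ⟨x, xs, rfl⟩ := List.exists_cons_of_ne_nil hne
    have hmsome : pvHeapMin (x :: xs) =
        some (xs.foldl (fun m y => if pvHeapLt y m then y else m) x) := rfl
    set m := xs.foldl (fun m y => if pvHeapLt y m then y else m) x with hmdef
    obtain ⟨hmmem, hmmin⟩ := pvHeapMin_perm _ _ hperm m hmsome
    have hment : m = pvEnt values rem b :=
      pvMin_eq_ent values rem b hblt' hkb hmin' m hmmem hmmin
    rw [List.foldl_cons, List.foldl_cons]
    set rem' := rem.set b (pvK rem b - 1) with hrem'
    have hK' : pvK rem' b = pvK rem b - 1 := pvK_set_self rem b _ hblt'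
    have hstepB : pvStepB values (rem, res) d = (rem', res + pvV values rem b * d) := by
      simp only [pvStepB, pvScan_rw values rem, hb, PySem.List.pySetD_natCast,
        PySem.List.pyGetD_natCast]
      have h1 : (rem.set b (rem.getD b 0 - 1)).getD b 0 = pvK rem b - 1 := by
        simpa [pvK] using pvK_set_self rem (b) (pvK rem b - 1) hblt'
      rw [h1]
      rfl
    have hstepA : pvStepA values (x :: xs, res) d =
        ((x :: xs).erase m ++ (if 1 < pvK rem b then [pvEnt values rem' b] else []),
          res + pvV values rem b * d) := by
      simp only [pvStepA, hmsome]
      rw [hment]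
      simp only [pvEnt]
      by_cases h1 : 1 < pvK rem b
      · rw [if_pos (by omega : pvK rem b - 1 > 0), if_pos h1]
        simp only [pvV, hK', PySem.List.pyGetD_natCast]
      · rw [if_neg (by omega : ¬ pvK rem b - 1 > 0), if_neg h1, List.append_nil]
    rw [hstepA, hstepB]
    have hperm' : ((x :: xs).erase m ++
        (if 1 < pvK rem b then [pvEnt values rem' b] else [])).Perm (pvFrontier values rem') := by
      have h1 : ((x :: xs).erase m).Perm ((pvFrontier values rem).erase (pvEnt values rem b)) := by
        rw [← hment]; exact hperm.erase m
      have h2 := pvFrontier_perm_update values rem b hblt' hkb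
      exact (List.Perm.append_right _ h1).trans h2.symm
    have hinv' : pvInv values rem' := by
      refine ⟨by simp [hrem', hleneq], ?_⟩
      intro r hr
      have hrlen : r < rem.length := by simpa [hrem'] using hr
      by_cases hrb : b = r
      · subst hrb
        rw [hK']
        have := hbounds b hblt'
        omega
      · rw [hrem', pvK_set_ne rem b r _ hrb]
        exact hbounds r hrlen
    have hlen' : ds.length ≤ (rem'.map Int.toNat).sum := by
      have := pvSum_dec rem b hblt' hkb
      rw [← hrem'] at this
      simp only [List.length_cons] at hlen
      omega
    exact ih _ rem' _ hperm' hinv' hlen'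

theorem pvReplicate_getD (n : Nat) (c : Int) (r : Nat) (h : r < n) :
    (List.replicate n c).getD r 0 = c := by
  rw [List.getD_eq_getElem?_getD, List.getElem?_replicate, if_pos h]
  rfl

-- ===== VERDICT (by name: the statement is the Claim_ definition above) =====
theorem maxSpending_spec : Claim_equal_maxSpending := by
  unfold Claim_equal_maxSpending
  intro values _ hpre
  obtain ⟨hne, hpos, hrows⟩ := hpre
  obtain ⟨row0, rest, rfl⟩ := List.exists_cons_of_ne_nil hne
  simp only [List.headD_cons] at hpos hrows
  unfold Spec_maxSpending maxSpending maxSpending_alt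
  simp only []
  set values := row0 :: rest with hvalues
  set COL : Int := PySem.List.len row0 with hCOL
  have hCOLn : COL = ((row0.length : Nat) : Int) := by simp [hCOL, PySem.List.len_eq]
  set n := values.length with hn
  set rem0 : List Int := List.replicate n COL with hrem0
  have hrem0len : rem0.length = n := by simp [hrem0]
  have hK0 : ∀ r < n, pvK rem0 r = COL := by
    intro r hr
    simp only [pvK, hrem0]
    exact pvReplicate_getD n COL r hr
  have hrowlen : ∀ r < n, (values.getD r []).length = row0.length := by
    intro r hr
    rw [List.getD_eq_getElem?_getD, List.getElem?_eq_getElem (by omega : r < values.length)]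
    exact hrows _ (List.getElem_mem _)
  have hpq0 : ((PySem.List.enumerate values 0).foldl
      (fun pq rr => pq ++ [(PySem.List.pyGetD rr.2 (-1) 0, rr.1, COL - 1)]) []) =
      pvFrontier values rem0 := by
    rw [PySem.List.foldl_append_singleton_eq_map, List.nil_append,
      PySem.List.enumerate_eq_map_pyRange values []]
    have h1 : PySem.List.len values = ((n : Nat) : Int) := by simp [hn, PySem.List.len_eq]
    rw [h1, PySem.List.pyRange_zero_nat, List.map_map, List.map_map, pvFrontier_eq, hrem0len]
    have h2 : (List.range n).filterMap (pvF values rem0) =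
        (List.range n).map (fun r => pvEnt values rem0 r) := by
      have hc : (List.range n).filterMap (pvF values rem0) =
          (List.range n).filterMap (fun r => some (pvEnt values rem0 r)) := by
        apply List.filterMap_congr
        intro r hr
        have hrn := List.mem_range.1 hr
        have hkpos : 0 < pvK rem0 r := by rw [hK0 r hrn]; omega
        simp [pvF, hkpos]
      rw [hc]
      simp
    rw [h2]
    apply List.map_eq_map_iff.mpr
    intro r hr
    have hrn := List.mem_range.1 hr
    have hlenr : (values.getD r []).length = row0.length := hrowlen r hrn
    have hner : values.getD r [] ≠ [] := by
      intro h; rw [h] at hlenr; simp at hlenr; omega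
    simp only [Function.comp, pvEnt, pvV, hK0 r hrn, PySem.List.pyGetD_natCast]
    refine congrArg (fun v => (v, (r : Int), COL - 1)) ?_
    rw [PySem.List.pyGetD_neg_one _ _ hner, List.getLast_eq_getElem hner,
      PySem.List.pyGetD_eq_getElem _ _ (by omega) (by rw [hlenr]; omega)]
    congr 1
    omega
  have hinv0 : pvInv values rem0 := by
    refine ⟨hrem0len, ?_⟩
    intro r hr
    rw [hK0 r (by omega), hrowlen r (by omega)]
    omega
  have hdays : (PySem.List.pyRange 1 (PySem.List.len values * COL + 1) 1).length ≤
      (rem0.map Int.toNat).sum := by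
    have h1 : PySem.List.len values = ((n : Nat) : Int) := by simp [hn, PySem.List.len_eq]
    rw [PySem.List.length_pyRange_one, h1, hCOLn]
    have : (List.map Int.toNat rem0).sum = n * row0.length := by
      rw [hrem0, hCOLn, List.map_replicate, List.sum_replicate]
      simp [Int.toNat_natCast]
    rw [this]
    have : ((n : Int) * (row0.length : Int) + 1 - 1) = ((n * row0.length : Nat) : Int) := by
      push_cast; ring
    rw [this, Int.toNat_natCast]
  rw [hpq0]
  exact pvLoop_eq values _ _ rem0 0 (List.Perm.refl _) hinv0 hdays
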